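-- pv_equiv track=rewrite | github.com/chldppwls12/StudyTocoteAllsolve | BOJ/1744_수_묶기/chldppwls12.py | solution
-- ===== SOURCE A (Python) =====
-- def solution(num_list):
--   ans = 0
--   positive_list = []
--   negative_list = []
--
--   for num in num_list:
--     if num > 1:
--       positive_list.append(num)
--     elif num <= 0:
--       negative_list.append(num)
--     elif num == 1:
--       ans += 1
--
--   positive_list.sort(reverse=True)
--   negative_list.sort()
--
--   if len(positive_list) % 2 == 0:
--     for i in range(0, len(positive_list), 2):
--       ans += positive_list[i] * positive_list[i+1]
--   else:
--     for i in range(0, len(positive_list)-1, 2):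
--       ans += positive_list[i] * positive_list[i+1]
--     ans += positive_list[-1]
--
--   if len(negative_list) % 2 == 0:
--     for i in range(0, len(negative_list), 2):
--       ans += negative_list[i] * negative_list[i+1]
--   else:
--     for i in range(0, len(negative_list)-1, 2):
--       ans += negative_list[i] * negative_list[i+1]
--     ans += negative_list[-1]
--
--   return ans
-- ===== SOURCE B (Python) =====
-- def solution(num_list):
--     # Dynamic programming over the sorted list: dp considers, for each element,
--     # taking it alone or pairing it with its predecessor; no greedy case analysis
--     # (no sign partitioning, no counting of 1s, no explicit pair loops).
--     s = sorted(num_list)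
--     if not s:
--         return 0
--     best2, best1, prev = 0, s[0], s[0]
--     for x in s[1:]:
--         best2, best1, prev = best1, max(best1 + x, best2 + prev * x), x
--     return best1
-- ===== Notes on version B (the rewrite author's own statement) =====
-- stated objective: alternative
-- what changed: B replaces A's greedy case analysis (partition by sign, two sorts, explicit pair loops and odd-leftover handling) with a dynamic program over the once-sorted list: dp[i] = max(dp[i-1]+s[i], dp[i-2]+s[i-1]*s[i]), which computes the optimal adjacent pairing with no sign/ones cases at all; equality with A's greedy is the proved theorem.
import Mathlib
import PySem

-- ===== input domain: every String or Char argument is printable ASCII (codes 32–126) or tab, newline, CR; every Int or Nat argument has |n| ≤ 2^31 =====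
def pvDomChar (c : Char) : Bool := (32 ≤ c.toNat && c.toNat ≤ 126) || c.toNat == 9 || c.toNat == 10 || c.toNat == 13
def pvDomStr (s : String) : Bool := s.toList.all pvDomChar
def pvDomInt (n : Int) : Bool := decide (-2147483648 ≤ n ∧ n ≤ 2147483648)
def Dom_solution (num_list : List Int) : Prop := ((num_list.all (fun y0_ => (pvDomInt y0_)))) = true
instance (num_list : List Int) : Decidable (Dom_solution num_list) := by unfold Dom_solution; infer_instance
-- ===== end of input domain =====

-- B replaces A's greedy case analysis (sign partition, two sorts, pair loops) with a
-- dynamic program dp[i] = max(dp[i-1]+s[i], dp[i-2]+s[i-1]*s[i]) over the once-sorted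
-- list (objective: alternative).

-- ===== PORT A =====
-- classification loop, the two sorts, and the two even/odd pair loops of A, step for step
def solution (num_list : List Int) : Int :=
  let st := num_list.foldl
    (fun (st : Int × List Int × List Int) num =>
      if num > 1 then (st.1, st.2.1 ++ [num], st.2.2)
      else if num ≤ 0 then (st.1, st.2.1, st.2.2 ++ [num])
      else if num = 1 then (st.1 + 1, st.2.1, st.2.2)
      else st)
    ((0 : Int), ([] : List Int), ([] : List Int))
  let positive_list := PySem.List.sorted st.2.1 (fun x => x) true
  let negative_list := PySem.List.sorted st.2.2 (fun x => x) false
  let ans1 :=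
    if positive_list.length % 2 = 0 then
      (PySem.List.pyRange 0 (positive_list.length : Int) 2).foldl
        (fun a i => a + PySem.List.pyGetD positive_list i 0 * PySem.List.pyGetD positive_list (i+1) 0) st.1
    else
      (PySem.List.pyRange 0 ((positive_list.length : Int) - 1) 2).foldl
        (fun a i => a + PySem.List.pyGetD positive_list i 0 * PySem.List.pyGetD positive_list (i+1) 0) st.1
      + PySem.List.pyGetD positive_list (-1) 0
  let ans2 :=
    if negative_list.length % 2 = 0 then
      (PySem.List.pyRange 0 (negative_list.length : Int) 2).foldl
        (fun a i => a + PySem.List.pyGetD negative_list i 0 * PySem.List.pyGetD negative_list (i+1) 0) ans1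
    else
      (PySem.List.pyRange 0 ((negative_list.length : Int) - 1) 2).foldl
        (fun a i => a + PySem.List.pyGetD negative_list i 0 * PySem.List.pyGetD negative_list (i+1) 0) ans1
      + PySem.List.pyGetD negative_list (-1) 0
  ans2

-- ===== PORT B =====
-- Source B: sort once; 'if not s: return 0'; then the dp loop over s[1:] carrying
-- (best2, best1, prev); the match on the sorted list is 'if not s' + s[0]/s[1:].
def solution_alt (num_list : List Int) : Int :=
  match PySem.List.sorted num_list (fun x => x) false with
  | [] => 0
  | h :: rest =>
      (rest.foldl
        (fun (st : Int × Int × Int) x => (st.2.1, max (st.2.1 + x) (st.1 + st.2.2 * x), x))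
        ((0 : Int), h, h)).2.1

-- ===== PRECONDITION & SPEC =====
def Spec_solution (num_list : List Int) (out : Int) : Prop := out = solution_alt num_list
instance (num_list : List Int) (out : Int) : Decidable (Spec_solution num_list out) := by unfold Spec_solution; infer_instance

-- ===== CLAIM (what is proved, stated in full; the proofs are below) =====
def Claim_equal_solution : Prop := ∀ (num_list : List Int), Dom_solution num_list → Spec_solution num_list (solution num_list)

-- ===== LEMMAS AND PROOFS =====

-- value of the greedy pairing: pairs adjacent elements two at a time, last alone if odd
def posPairsB : List Int → Int
  | a :: b :: rest => a * b + posPairsB rest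
  | [a] => a
  | [] => 0

-- the dp value, as a top-down recursion (the fold in the port computes it bottom-up)
def dpF : List Int → Int
  | [] => 0
  | [a] => a
  | a :: b :: t => max (a + dpF (b :: t)) (a * b + dpF t)

-- closed form of A's answer on the sorted list
def FClosed (s : List Int) : Int :=
  posPairsB (s.filter (fun x => decide (x ≤ 0)))
  + (s.countP (fun x => decide (x = 1)) : Int)
  + posPairsB ((s.filter (fun x => decide (1 < x))).reverse)

theorem classifyA (l : List Int) (ans : Int) (pl nl : List Int) :
    l.foldl
      (fun (st : Int × List Int × List Int) num =>
        if num > 1 then (st.1, st.2.1 ++ [num], st.2.2)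
        else if num ≤ 0 then (st.1, st.2.1, st.2.2 ++ [num])
        else if num = 1 then (st.1 + 1, st.2.1, st.2.2)
        else st) (ans, pl, nl)
    = (ans + (l.countP (fun x => decide (x = 1)) : Int),
       pl ++ l.filter (fun x => decide (1 < x)),
       nl ++ l.filter (fun x => decide (x ≤ 0))) := by
  induction l generalizing ans pl nl with
  | nil => simp
  | cons a t ih =>
      simp only [List.foldl_cons, List.countP_cons, List.filter_cons]
      by_cases h1 : 1 < a
      · simp [h1, ih]
        omega
      · by_cases h0 : a ≤ 0
        · simp [h1, h0, ih]
          omega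
        · have ha : a = 1 := by omega
          simp [ha, ih]
          ring

theorem posPairsB_append_pair (x y : Int) :
    ∀ (l : List Int), l.length % 2 = 0 → posPairsB (l ++ [x, y]) = posPairsB l + x * y := by
  intro l
  induction l using posPairsB.induct with
  | case1 a b rest ih =>
      intro h
      simp only [List.length_cons] at h
      simp only [List.cons_append, posPairsB, ih (by omega)]
      ring
  | case2 a => intro h; simp at h
  | case3 => intro _; simp [posPairsB]

theorem posPairsB_append_single (x : Int) :
    ∀ (l : List Int), l.length % 2 = 0 → posPairsB (l ++ [x]) = posPairsB l + x := by
  intro l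
  induction l using posPairsB.induct with
  | case1 a b rest ih =>
      intro h
      simp only [List.length_cons] at h
      simp only [List.cons_append, posPairsB, ih (by omega)]
      ring
  | case2 a => intro h; simp at h
  | case3 => intro _; simp [posPairsB]

theorem posPairsB_append_three (x y z : Int) (l : List Int) (h : l.length % 2 = 0) :
    posPairsB (l ++ [x, y, z]) = posPairsB l + x * y + z := by
  rw [show l ++ [x, y, z] = (l ++ [x, y]) ++ [z] by simp,
    posPairsB_append_single z (l ++ [x, y]) (by simp; omega),
    posPairsB_append_pair x y l h]

theorem pyRange_two (m : Nat) :
    PySem.List.pyRange 0 ((2*m : Nat) : Int) 2 = (List.range m).map (fun k => ((2*k : Nat) : Int)) := by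
  rw [PySem.List.pyRange_of_pos 0 ((2*m : Nat) : Int) (by norm_num)]
  rcases Nat.eq_zero_or_pos m with hm | hm
  · subst hm; simp
  · rw [if_pos (by push_cast; omega)]
    have hc : (((2*m : Nat) : Int) - 0 + 2 - 1) / 2 = (m : Int) := by push_cast; omega
    rw [hc]
    simp only [Int.toNat_natCast]
    apply List.map_congr_left
    intro k _
    push_cast
    ring

theorem loopEq (l : List Int) :
    ∀ (m : Nat) (ans : Int), 2 * m ≤ l.length →
    (PySem.List.pyRange 0 ((2 * m : Nat) : Int) 2).foldl
      (fun a i => a + PySem.List.pyGetD l i 0 * PySem.List.pyGetD l (i+1) 0) ans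
    = ans + posPairsB (l.take (2 * m)) := by
  intro m
  induction m with
  | zero =>
      intro ans _
      rw [(by norm_num : ((2*0 : Nat) : Int) = 0),
        PySem.List.pyRange_of_pos 0 0 (by norm_num : (0:Int) < 2)]
      simp [posPairsB]
  | succ m ih =>
      intro ans h
      rw [pyRange_two, List.range_succ, List.map_append, List.foldl_append, ← pyRange_two,
        ih ans (by omega)]
      have h1 : 2 * m < l.length := by omega
      have h2 : 2 * m + 1 < l.length := by omega
      simp only [List.map_cons, List.map_nil, List.foldl_cons, List.foldl_nil]
      have g1 : PySem.List.pyGetD l ((2*m : Nat) : Int) 0 = l[2*m] := by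
        rw [PySem.List.pyGetD_natCast, List.getD_eq_getElem l 0 h1]
      have g2 : PySem.List.pyGetD l (((2*m : Nat) : Int) + 1) 0 = l[2*m+1] := by
        have : ((2*m : Nat) : Int) + 1 = ((2*m+1 : Nat) : Int) := by push_cast; ring
        rw [this, PySem.List.pyGetD_natCast, List.getD_eq_getElem l 0 h2]
      rw [g1, g2]
      have ht : l.take (2 * (m+1)) = l.take (2*m) ++ [l[2*m], l[2*m+1]] := by
        have e1 : 2 * (m+1) = (2*m+1) + 1 := by omega
        have t2 : List.take (2*m+1+1) l = List.take (2*m+1) l ++ [l[2*m+1]] := by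
          rw [List.take_add_one]; simp [List.getElem?_eq_getElem h2]
        have t1 : List.take (2*m+1) l = List.take (2*m) l ++ [l[2*m]] := by
          rw [List.take_add_one]; simp [List.getElem?_eq_getElem h1]
        rw [e1, t2, t1, List.append_assoc]
        simp
      rw [ht, posPairsB_append_pair _ _ _ (by simp [List.length_take]; omega)]
      ring

theorem pairBlockEq (l : List Int) (ans : Int) :
    (if l.length % 2 = 0 then
      (PySem.List.pyRange 0 (l.length : Int) 2).foldl
        (fun a i => a + PySem.List.pyGetD l i 0 * PySem.List.pyGetD l (i+1) 0) ans
    else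
      (PySem.List.pyRange 0 ((l.length : Int) - 1) 2).foldl
        (fun a i => a + PySem.List.pyGetD l i 0 * PySem.List.pyGetD l (i+1) 0) ans
      + PySem.List.pyGetD l (-1) 0)
    = ans + posPairsB l := by
  by_cases hp : l.length % 2 = 0
  · rw [if_pos hp]
    have e : (l.length : Int) = ((2 * (l.length / 2) : Nat) : Int) := by
      push_cast; omega
    rw [e, loopEq l (l.length / 2) ans (by omega), List.take_of_length_le (by omega)]
  · rw [if_neg hp]
    have hne : l ≠ [] := by intro h; subst h; simp at hp
    have e : (l.length : Int) - 1 = ((2 * (l.length / 2) : Nat) : Int) := by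
      push_cast; omega
    rw [e, loopEq l (l.length / 2) ans (by omega), PySem.List.pyGetD_neg_one l 0 hne]
    have ht : l.take (2 * (l.length / 2)) = l.dropLast := by
      rw [List.dropLast_eq_take]
      congr 1
      omega
    rw [ht]
    conv_rhs => rw [← List.dropLast_concat_getLast hne]
    rw [posPairsB_append_single _ _ (by simp [List.length_dropLast]; omega)]
    ring

theorem neg_sorted_eq (l : List Int) :
    PySem.List.sorted (l.filter (fun x => decide (x ≤ 0))) (fun x => x) false
    = (PySem.List.sorted l (fun x => x) false).filter (fun x => decide (x ≤ 0)) := by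
  apply PySem.List.eq_of_perm_of_pairwise_le_of_injective (fun x : Int => x)
    (fun a b h => h)
  · exact (PySem.List.sorted_perm _ _ _).trans ((PySem.List.sorted_perm l _ _).filter _).symm
  · exact PySem.List.sorted_pairwise _ _
  · exact (PySem.List.sorted_pairwise l _).sublist List.filter_sublist

theorem pos_sorted_eq (l : List Int) :
    PySem.List.sorted (l.filter (fun x => decide (1 < x))) (fun x => x) true
    = ((PySem.List.sorted l (fun x => x) false).filter (fun x => decide (1 < x))).reverse := by
  apply PySem.List.eq_of_perm_of_pairwise_le_of_injective (fun x : Int => -x)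
    neg_injective
  · exact (PySem.List.sorted_perm _ _ _).trans
      (((PySem.List.sorted_perm l _ _).filter _).symm.trans (List.reverse_perm _).symm)
  · exact (PySem.List.sorted_pairwise_rev _ _).imp (fun h => by omega)
  · have hpw : ((PySem.List.sorted l (fun x => x) false).filter
        (fun x => decide (1 < x))).Pairwise (· ≤ ·) :=
      (PySem.List.sorted_pairwise l _).sublist List.filter_sublist
    exact List.pairwise_reverse.mpr (hpw.imp (fun h => by omega))

-- A's answer is the closed form on the sorted list
theorem solution_closed (l : List Int) :
    solution l = FClosed (PySem.List.sorted l (fun x => x) false) := by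
  unfold solution
  rw [classifyA l 0 [] []]
  simp only [List.nil_append, zero_add]
  rw [pos_sorted_eq, neg_sorted_eq, pairBlockEq, pairBlockEq]
  have hc : ((PySem.List.sorted l (fun x => x) false).countP
      (fun x => decide (x = 1))) = l.countP (fun x => decide (x = 1)) :=
    (PySem.List.sorted_perm l _ _).countP_eq _
  unfold FClosed
  rw [hc]
  ring

-- ==== B side: the fold computes dpF ====

-- last element with default 0 (definitionally steps on cons-cons)
def lastD0 : List Int → Int
  | [] => 0
  | [a] => a
  | _ :: b :: t => lastD0 (b :: t)

theorem lastD0_concat : ∀ (s : List Int) (x : Int), lastD0 (s ++ [x]) = x := by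
  intro s
  induction s using lastD0.induct with
  | case1 => intro x; rfl
  | case2 a => intro x; rfl
  | case3 a b t ih => intro x; exact ih x

theorem dpF_snoc : ∀ (s : List Int), s ≠ [] → ∀ (x : Int),
    dpF (s ++ [x]) = max (dpF s + x) (dpF s.dropLast + lastD0 s * x) := by
  intro s
  induction s using dpF.induct with
  | case1 => intro h; exact absurd rfl h
  | case2 a =>
      intro _ x
      show max (a + x) (a * x + 0) = max (a + x) (0 + a * x)
      omega
  | case3 a b t ih1 ih2 =>
      intro _ x
      cases t with
      | nil =>
          show max (a + max (b + x) (b * x + 0)) (a * b + x)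
            = max (max (a + b) (a * b + 0) + x) (a + b * x)
          generalize a * b = p
          generalize b * x = q
          generalize a * x = r
          omega
      | cons c t'' =>
          show max (a + dpF ((b :: c :: t'') ++ [x])) (a * b + dpF ((c :: t'') ++ [x])) = _
          rw [ih1 (by simp) x, ih2 (by simp) x]
          show max (a + max (dpF (b :: c :: t'') + x) (dpF (b :: (c :: t'').dropLast) + lastD0 (c :: t'') * x))
              (a * b + max (dpF (c :: t'') + x) (dpF ((c :: t'').dropLast) + lastD0 (c :: t'') * x))
            = max (max (a + dpF (b :: c :: t'')) (a * b + dpF (c :: t'')) + x)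
              (max (a + dpF (b :: (c :: t'').dropLast)) (a * b + dpF ((c :: t'').dropLast))
                + lastD0 (c :: t'') * x)
          generalize dpF (b :: c :: t'') = A
          generalize dpF (b :: (c :: t'').dropLast) = B
          generalize dpF (c :: t'') = C
          generalize dpF ((c :: t'').dropLast) = D
          generalize a * b = p
          generalize lastD0 (c :: t'') * x = q
          omega

theorem dp_fold : ∀ (t s : List Int), s ≠ [] →
    (t.foldl
      (fun (st : Int × Int × Int) x => (st.2.1, max (st.2.1 + x) (st.1 + st.2.2 * x), x))
      (dpF s.dropLast, dpF s, lastD0 s)).2.1 = dpF (s ++ t) := by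
  intro t
  induction t with
  | nil => intro s _; simp
  | cons x t' ih =>
      intro s hs
      rw [List.foldl_cons]
      have h := ih (s ++ [x]) (by simp)
      rw [List.dropLast_concat, lastD0_concat, dpF_snoc s hs x, List.append_assoc] at h
      exact h

theorem alt_eq_dpF (l : List Int) :
    solution_alt l = dpF (PySem.List.sorted l (fun x => x) false) := by
  unfold solution_alt
  cases hs : PySem.List.sorted l (fun x => x) false with
  | nil => simp [dpF]
  | cons h rest =>
      have := dp_fold rest [h] (by simp)
      simpa [dpF, lastD0] using this

-- ==== the optimality proof: dpF = FClosed on sorted lists ====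

-- posPairsB of a reversed list: same pairs when the length is even, head alone when odd
theorem posPairs_reverse : ∀ (n : Nat) (l : List Int), l.length ≤ n →
    posPairsB l.reverse
    = if l.length % 2 = 0 then posPairsB l else l.headD 0 + posPairsB l.tail := by
  intro n
  induction n with
  | zero =>
      intro l hl
      have : l = [] := List.length_eq_zero_iff.mp (by omega)
      subst this
      simp [posPairsB]
  | succ n ih =>
      intro l hl
      match l with
      | [] => simp [posPairsB]
      | [a] => simp [posPairsB]
      | a :: b :: t =>
        simp only [List.length_cons] at hl
        by_cases ht : t.length % 2 = 0
        · have hrev : (a :: b :: t).reverse = t.reverse ++ [b, a] := by simp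
          rw [hrev, posPairsB_append_pair b a t.reverse (by simpa using ht),
            ih t (by omega)]
          rw [if_pos ht, if_pos (by simp [List.length_cons]; omega)]
          show posPairsB t + b * a = a * b + posPairsB t
          ring
        · obtain ⟨c, t'', rfl⟩ : ∃ c t'', t = c :: t'' := by
            cases t with
            | nil => simp at ht
            | cons c t'' => exact ⟨c, t'', rfl⟩
          have ht'' : t''.length % 2 = 0 := by simp [List.length_cons] at ht; omega
          have hrev : (a :: b :: c :: t'').reverse = t''.reverse ++ [c, b, a] := by simp
          rw [hrev, posPairsB_append_three c b a t''.reverse (by simpa using ht''),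
            ih t'' (by simp at hl ⊢; omega)]
          rw [if_pos ht'', if_neg (by simp [List.length_cons] at ht ⊢; omega)]
          show posPairsB t'' + c * b + a = (a :: b :: c :: t'').headD 0 + posPairsB (b :: c :: t'')
          show posPairsB t'' + c * b + a = a + (b * c + posPairsB t'')
          ring

-- on a list of elements ≥ 2 the closed form is just the reversed pairing
theorem FClosed_ge2 (s : List Int) (h : ∀ x ∈ s, 2 ≤ x) :
    FClosed s = posPairsB s.reverse := by
  unfold FClosed
  have h0 : s.filter (fun x => decide (x ≤ 0)) = [] :=
    List.filter_eq_nil_iff.mpr (fun x hx => by have := h x hx; simp; omega)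
  have h1 : s.countP (fun x => decide (x = 1)) = 0 :=
    List.countP_eq_zero.mpr (fun x hx => by have := h x hx; simp; omega)
  have h2 : s.filter (fun x => decide (1 < x)) = s :=
    List.filter_eq_self.mpr (fun x hx => by have := h x hx; simp; omega)
  rw [h0, h1, h2]
  simp [posPairsB]

-- pairing two non-positives is never worse than taking the smaller alone
theorem neg_pair_le : ∀ (N : List Int) (a b : Int), a ≤ b → b ≤ 0 →
    (b :: N).Pairwise (· ≤ ·) → (∀ x ∈ N, x ≤ 0) →
    a + posPairsB (b :: N) ≤ a * b + posPairsB N := by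
  intro N
  induction N using posPairsB.induct with
  | case1 c d N' ih =>
      intro a b hab hb0 hpw hN
      have hbc : b ≤ c := (List.pairwise_cons.mp hpw).1 c (by simp)
      have hcd : c ≤ d := (List.pairwise_cons.mp (List.pairwise_cons.mp hpw).2).1 d (by simp)
      have hc0 : c ≤ 0 := hN c (by simp)
      have hd0 : d ≤ 0 := hN d (by simp)
      have hih := ih c d hcd hd0
        ((List.pairwise_cons.mp hpw).2.sublist (by simp))
        (fun x hx => hN x (by simp [hx]))
      show a + (b * c + posPairsB (d :: N')) ≤ a * b + (c * d + posPairsB N')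
      nlinarith [hih, mul_nonpos_of_nonpos_of_nonneg (show a - c ≤ 0 by omega)
        (show (0:Int) ≤ 1 - b by omega)]
  | case2 c =>
      intro a b hab hb0 hpw hN
      have hbc : b ≤ c := (List.pairwise_cons.mp hpw).1 c (by simp)
      show a + (b * c + 0) ≤ a * b + c
      nlinarith [mul_nonpos_of_nonpos_of_nonneg (show a - c ≤ 0 by omega)
        (show (0:Int) ≤ 1 - b by omega)]
  | case3 =>
      intro a b hab hb0 _ _
      show a + b ≤ a * b + 0
      nlinarith [mul_nonneg (show (0:Int) ≤ -a by omega) (show (0:Int) ≤ -b by omega)]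

-- cons-step facts about the closed form
theorem FClosed_cons_one (s : List Int) : FClosed ((1 : Int) :: s) = 1 + FClosed s := by
  unfold FClosed
  simp
  ring

theorem FClosed_cons_neg0 (a : Int) (s : List Int) (ha : a ≤ 0)
    (hs : s.filter (fun x => decide (x ≤ 0)) = []) :
    FClosed (a :: s) = a + FClosed s := by
  unfold FClosed
  have h1 : ¬ a = 1 := by omega
  have h2 : ¬ 1 < a := by omega
  simp [ha, h1, h2, hs, posPairsB]
  ring

theorem FClosed_cons_negpair (a b : Int) (s : List Int) (ha : a ≤ 0) (hb : b ≤ 0) :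
    FClosed (a :: b :: s) = a * b + FClosed s := by
  unfold FClosed
  have ha1 : ¬ a = 1 := by omega
  have ha2 : ¬ 1 < a := by omega
  have hb1 : ¬ b = 1 := by omega
  have hb2 : ¬ 1 < b := by omega
  simp [ha, hb, ha1, ha2, hb1, hb2, posPairsB]
  ring

theorem FClosed_cons_neg (b : Int) (s : List Int) (hb : b ≤ 0) :
    FClosed (b :: s)
    = posPairsB (b :: s.filter (fun x => decide (x ≤ 0)))
      + (s.countP (fun x => decide (x = 1)) : Int)
      + posPairsB ((s.filter (fun x => decide (1 < x))).reverse) := by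
  unfold FClosed
  have h1 : ¬ b = 1 := by omega
  have h2 : ¬ 1 < b := by omega
  simp [hb, h1, h2]

theorem dpF_eq_FClosed : ∀ (s : List Int), s.Pairwise (· ≤ ·) → dpF s = FClosed s := by
  intro s
  induction s using dpF.induct with
  | case1 => intro _; simp [dpF, FClosed, posPairsB]
  | case2 a =>
      intro _
      show a = FClosed [a]
      unfold FClosed
      by_cases h0 : a ≤ 0
      · have h1 : ¬ a = 1 := by omega
        have h2 : ¬ 1 < a := by omega
        simp [h0, h1, h2, posPairsB]
      · by_cases h1 : a = 1
        · simp [h1, posPairsB]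
        · have h2 : 1 < a := by omega
          simp [h0, h1, h2, posPairsB]
  | case3 a b t ih1 ih2 =>
      intro hpw
      have hab : a ≤ b := (List.pairwise_cons.mp hpw).1 b (by simp)
      have hbt : ∀ x ∈ t, b ≤ x := fun x hx =>
        (List.pairwise_cons.mp (List.pairwise_cons.mp hpw).2).1 x hx
      have hpw2 : (b :: t).Pairwise (· ≤ ·) := (List.pairwise_cons.mp hpw).2
      have hpw3 : t.Pairwise (· ≤ ·) := (List.pairwise_cons.mp hpw2).2
      show max (a + dpF (b :: t)) (a * b + dpF t) = FClosed (a :: b :: t)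
      rw [ih1 hpw2, ih2 hpw3]
      by_cases hb0 : b ≤ 0
      · -- both a and b non-positive: the dp pairs them, as the greedy does
        have ha0 : a ≤ 0 := le_trans hab hb0
        rw [FClosed_cons_negpair a b t ha0 hb0, FClosed_cons_neg b t hb0]
        have key := neg_pair_le (t.filter (fun x => decide (x ≤ 0))) a b hab hb0
          (List.pairwise_cons.mpr
            ⟨fun x hx => hbt x (List.mem_of_mem_filter hx),
             hpw3.sublist List.filter_sublist⟩)
          (fun x hx => by have := List.of_mem_filter hx; simpa using this)
        show max (a + _) (a * b + FClosed t) = a * b + FClosed t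
        show max (a + _) (a * b + (posPairsB (t.filter (fun x => decide (x ≤ 0)))
          + (t.countP (fun x => decide (x = 1)) : Int)
          + posPairsB ((t.filter (fun x => decide (1 < x))).reverse)))
          = a * b + (posPairsB (t.filter (fun x => decide (x ≤ 0)))
          + (t.countP (fun x => decide (x = 1)) : Int)
          + posPairsB ((t.filter (fun x => decide (1 < x))).reverse))
        omega
      · -- b ≥ 1: everything from b on is at least 1
        have hb1 : 1 ≤ b := by omega
        have ht0 : t.filter (fun x => decide (x ≤ 0)) = [] :=
          List.filter_eq_nil_iff.mpr (fun x hx => by have := hbt x hx; simp; omega)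
        by_cases hb1' : b = 1
        · -- b = 1: the dp takes b alone (pairing with 1 never helps)
          subst hb1'
          rw [FClosed_cons_one t]
          by_cases ha0 : a ≤ 0
          · rw [FClosed_cons_neg0 a ((1:Int) :: t) ha0 (by simp [ht0]),
              FClosed_cons_one t]
            have : a * 1 = a := by ring
            rw [this]
            omega
          · have ha1 : a = 1 := by omega
            subst ha1
            rw [FClosed_cons_one ((1:Int) :: t), FClosed_cons_one t]
            have : (1:Int) * 1 = 1 := by ring
            rw [this]
            omega
        · -- b ≥ 2
          have hb2 : 2 ≤ b := by omega
          have hbt2 : ∀ x ∈ b :: t, 2 ≤ x := by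
            intro x hx
            rcases List.mem_cons.mp hx with rfl | hx
            · exact hb2
            · have := hbt x hx; omega
          have ht2 : ∀ x ∈ t, 2 ≤ x := fun x hx => hbt2 x (by simp [hx])
          rw [FClosed_ge2 (b :: t) hbt2, FClosed_ge2 t ht2,
            posPairs_reverse (b :: t).length (b :: t) le_rfl,
            posPairs_reverse t.length t le_rfl]
          by_cases hpar : t.length % 2 = 0
          · -- |t| even, so |b::t| is odd: the greedy leaves b alone
            rw [if_neg (by simp [List.length_cons]; omega), if_pos hpar]
            show max (a + (b + posPairsB t)) (a * b + posPairsB t) = FClosed (a :: b :: t)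
            by_cases ha0 : a ≤ 0
            · rw [FClosed_cons_neg0 a (b :: t) ha0 (by simp [hb0, ht0]),
                FClosed_ge2 (b :: t) hbt2,
                posPairs_reverse (b :: t).length (b :: t) le_rfl,
                if_neg (by simp [List.length_cons]; omega)]
              show _ = a + (b + posPairsB t)
              have hk : a * b ≤ a + b := by nlinarith
              omega
            · by_cases ha1 : a = 1
              · subst ha1
                rw [FClosed_cons_one (b :: t), FClosed_ge2 (b :: t) hbt2,
                  posPairs_reverse (b :: t).length (b :: t) le_rfl,
                  if_neg (by simp [List.length_cons]; omega)]
                show _ = 1 + (b + posPairsB t)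
                have hk : (1:Int) * b = b := by ring
                rw [hk]
                omega
              · -- a ≥ 2: even total length, the dp pairs a with b, as the greedy does
                have ha2 : 2 ≤ a := by omega
                rw [FClosed_ge2 (a :: b :: t) (by
                    intro x hx
                    rcases List.mem_cons.mp hx with rfl | hx
                    · exact ha2
                    · exact hbt2 x hx),
                  posPairs_reverse (a :: b :: t).length (a :: b :: t) le_rfl,
                  if_pos (by simp [List.length_cons]; omega)]
                show _ = a * b + posPairsB t
                have hk : a + b ≤ a * b := by nlinarith
                omega
          · -- |t| odd
            obtain ⟨c, t'', rfl⟩ : ∃ c t'', t = c :: t'' := by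
              cases t with
              | nil => simp at hpar
              | cons c t'' => exact ⟨c, t'', rfl⟩
            have hpar'' : t''.length % 2 = 0 := by simp [List.length_cons] at hpar; omega
            have hbc : b ≤ c := hbt c (by simp)
            have hc2 : 2 ≤ c := by omega
            have hac : a ≤ c := le_trans hab hbc
            rw [if_pos (by simp [List.length_cons]; omega),
              if_neg (by simp [List.length_cons]; omega)]
            show max (a + (b * c + posPairsB t'')) (a * b + (c + posPairsB t''))
              = FClosed (a :: b :: c :: t'')
            have hswap : a * b + c ≤ a + b * c := by
              nlinarith [mul_nonneg (show (0:Int) ≤ b - 1 by omega) (show (0:Int) ≤ c - a by omega)]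
            by_cases ha0 : a ≤ 0
            · rw [FClosed_cons_neg0 a (b :: c :: t'') ha0
                  (by simp [hb0, ht0]),
                FClosed_ge2 (b :: c :: t'') hbt2,
                posPairs_reverse (b :: c :: t'').length (b :: c :: t'') le_rfl,
                if_pos (by simp [List.length_cons]; omega)]
              show _ = a + posPairsB (b :: c :: t'')
              show _ = a + (b * c + posPairsB t'')
              omega
            · by_cases ha1 : a = 1
              · subst ha1
                rw [FClosed_cons_one (b :: c :: t''), FClosed_ge2 (b :: c :: t'') hbt2,
                  posPairs_reverse (b :: c :: t'').length (b :: c :: t'') le_rfl,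
                  if_pos (by simp [List.length_cons]; omega)]
                show _ = 1 + posPairsB (b :: c :: t'')
                show _ = 1 + (b * c + posPairsB t'')
                have hk : (1:Int) * b = b := by ring
                rw [hk]
                have hbc1 : b + c ≤ 1 + b * c := by
                  nlinarith [mul_nonneg (show (0:Int) ≤ b - 1 by omega) (show (0:Int) ≤ c - 1 by omega)]
                omega
              · have ha2 : 2 ≤ a := by omega
                rw [FClosed_ge2 (a :: b :: c :: t'') (by
                    intro x hx
                    rcases List.mem_cons.mp hx with rfl | hx
                    · exact ha2
                    · exact hbt2 x hx),
                  posPairs_reverse (a :: b :: c :: t'').length (a :: b :: c :: t'') le_rfl,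
                  if_neg (by simp [List.length_cons]; omega)]
                show _ = (a :: b :: c :: t'').headD 0 + posPairsB (b :: c :: t'')
                show _ = a + (b * c + posPairsB t'')
                omega

theorem solution_eq_alt (l : List Int) : solution l = solution_alt l := by
  rw [solution_closed, alt_eq_dpF,
    dpF_eq_FClosed _ (PySem.List.sorted_pairwise l _)]

-- ===== VERDICT (by name: the statement is the Claim_ definition above) =====
theorem solution_spec : Claim_equal_solution := by
  intro num_list _
  unfold Spec_solution
  exact solution_eq_alt num_list
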